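-- pv_equiv track=rewrite | github.com/eunaJung01/Algorithm-Solvings | Programmers/Level_2/스킬트리.py | is_able_skill_tree
-- ===== SOURCE A (Python) =====
-- def is_able_skill_tree(skill, tree):
--     order = []
--     for t in tree:
--         if t in skill:
--             order.append(t)
--
--     for i, o in enumerate(order):
--         if o != skill[i]:
--             return False
--     return True
-- ===== SOURCE B (Python) =====
-- def is_able_skill_tree(skill, tree):
--     # Dual traversal: iterate over skill, lazily consuming tree through one iterator;
--     # for each required skill, the next learnable skill appearing in tree must be it.
--     learnable = set(skill)
--     rest = iter(tree)
--     for s in skill: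
--         t = next((c for c in rest if c in learnable), None)
--         if t is None:
--             return True
--         if t != s:
--             return False
--     return True
-- ===== Notes on version B (the rewrite author's own statement) =====
-- stated objective: alternative
-- what changed: B inverts the traversal: instead of A's two staged passes (build the filtered order list from tree, then compare it index-by-index against skill), B loops over skill itself and lazily consumes a single iterator over tree, with a precomputed set for membership; no intermediate list and no indexing are used.
import Mathlib
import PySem

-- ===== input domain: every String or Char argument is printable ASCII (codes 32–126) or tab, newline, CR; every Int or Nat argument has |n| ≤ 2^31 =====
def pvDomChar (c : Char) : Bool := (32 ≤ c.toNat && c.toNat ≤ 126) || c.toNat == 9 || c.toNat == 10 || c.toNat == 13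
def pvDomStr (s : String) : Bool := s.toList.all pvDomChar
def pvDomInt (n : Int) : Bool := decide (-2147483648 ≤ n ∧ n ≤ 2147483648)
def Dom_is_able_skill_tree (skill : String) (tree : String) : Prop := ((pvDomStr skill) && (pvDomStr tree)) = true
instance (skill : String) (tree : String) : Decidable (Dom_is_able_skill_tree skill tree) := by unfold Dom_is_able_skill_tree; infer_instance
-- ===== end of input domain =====

-- B inverts the traversal: a loop over skill lazily consuming one iterator over tree
-- (set membership, no intermediate list), instead of A's filter-then-compare passes
-- (objective: alternative).


-- ===== PORT A =====
-- second loop of A: for i, o in enumerate(order): if o != skill[i]: return False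
-- (skill[i] out of range = IndexError in Python; excluded by Pre_, the port returns true there)
def pvCheckOrder (skill : String) : List Char → Nat → Bool
  | [], _ => true
  | o :: rest, i =>
    match PySem.Str.pyGet? skill (i : Int) with
    | none => true
    | some c => if o ≠ c then false else pvCheckOrder skill rest (i + 1)

def is_able_skill_tree (skill : String) (tree : String) : Bool :=
  let order := tree.toList.foldl
    (fun acc t => if PySem.Chars.isIn [t] skill.toList then acc ++ [t] else acc) []
  pvCheckOrder skill order 0

-- ===== PORT B =====
-- next(c for c in rest-iterator if c in learnable): drop tree chars until one in the set
def pvNextLearnable (learnable : PySem.Set Char) : List Char → Option (Char × List Char)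
  | [] => none
  | t :: rest =>
    if PySem.Set.contains learnable t then some (t, rest) else pvNextLearnable learnable rest

-- outer loop over skill, carrying the remaining tree iterator
def pvSkillLoop (learnable : PySem.Set Char) : List Char → List Char → Bool
  | [], _ => true
  | s :: ss, rest =>
    match pvNextLearnable learnable rest with
    | none => true
    | some (t, rest') => if t ≠ s then false else pvSkillLoop learnable ss rest'

def is_able_skill_tree_alt (skill : String) (tree : String) : Bool :=
  pvSkillLoop (PySem.Set.ofList skill.toList) skill.toList tree.toList

-- ===== PRECONDITION & SPEC =====
-- Pre_ excludes exactly the inputs where Python A raises IndexError: when the characters of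
-- tree that occur in skill are more numerous than skill and start with skill itself.
def Pre_is_able_skill_tree (skill : String) (tree : String) : Prop :=
  ¬ (skill.toList <+: (tree.toList.filter (fun t => t ∈ skill.toList)) ∧
     skill.toList.length < (tree.toList.filter (fun t => t ∈ skill.toList)).length)
instance (skill : String) (tree : String) : Decidable (Pre_is_able_skill_tree skill tree) := by
  unfold Pre_is_able_skill_tree; infer_instance

def pvWitness_is_able_skill_tree : String × String := ("CBD", "BACDE")

def Spec_is_able_skill_tree (skill : String) (tree : String) (out : Bool) : Prop := out = is_able_skill_tree_alt skill tree
instance (skill : String) (tree : String) (out : Bool) : Decidable (Spec_is_able_skill_tree skill tree out) := by unfold Spec_is_able_skill_tree; infer_instance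

-- ===== CLAIM (what is proved, stated in full; the proofs are below) =====
def Claim_equal_is_able_skill_tree : Prop := ∀ (skill : String) (tree : String), Dom_is_able_skill_tree skill tree → Pre_is_able_skill_tree skill tree → Spec_is_able_skill_tree skill tree (is_able_skill_tree skill tree)

-- ===== LEMMAS AND PROOFS =====

-- A's single-char substring test 't in skill' is char membership
lemma pvIsIn_singleton (t : Char) (s : List Char) :
    PySem.Chars.isIn [t] s = true ↔ t ∈ s := by
  rw [PySem.Chars.isIn_iff_infix]
  constructor
  · exact fun h => h.mem (by simp)
  · intro h
    obtain ⟨l, r, rfl⟩ := List.append_of_mem h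
    exact ⟨l, r, by simp⟩

-- B's set membership agrees with A's substring test
lemma pvContains_ofList (t : Char) (s : List Char) :
    PySem.Set.contains (PySem.Set.ofList s) t = PySem.Chars.isIn [t] s := by
  cases hb : PySem.Chars.isIn [t] s with
  | true =>
    have := (pvIsIn_singleton t s).1 hb
    simp [PySem.Set.contains, PySem.Set.mem_ofList, this]
  | false =>
    have : t ∉ s := fun hm => by simp [(pvIsIn_singleton t s).2 hm] at hb
    simp [PySem.Set.contains, PySem.Set.mem_ofList, this]

-- A's append-folded order list is the filter of tree by the membership test
lemma pvOrder_eq_filter (skill : String) (ts : List Char) :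
    ts.foldl (fun acc t => if PySem.Chars.isIn [t] skill.toList then acc ++ [t] else acc) []
      = ts.filter (fun t => PySem.Chars.isIn [t] skill.toList) := by
  simpa using PySem.List.foldl_append_if (fun t => PySem.Chars.isIn [t] skill.toList) id ts []

-- core: index-wise check of the filtered tree against skill = B's dual traversal,
-- where the index i corresponds to the remaining skill suffix skill.drop i
lemma pvCheck_filter_eq_skillLoop (skill : String) (ts : List Char) (i : Nat) :
    pvCheckOrder skill (ts.filter (fun t => PySem.Chars.isIn [t] skill.toList)) i
      = pvSkillLoop (PySem.Set.ofList skill.toList) (skill.toList.drop i) ts := by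
  induction ts generalizing i with
  | nil =>
    cases h : skill.toList.drop i <;> simp [pvCheckOrder, pvSkillLoop, pvNextLearnable]
  | cons t rest ih =>
    by_cases ht : PySem.Chars.isIn [t] skill.toList
    · simp only [List.filter_cons, ht, if_pos, pvCheckOrder]
      have hget : PySem.Str.pyGet? skill (i : Int) = skill.toList[i]? :=
        PySem.Str.pyGet?_natCast skill i
      cases hd : skill.toList.drop i with
      | nil =>
        have : skill.toList[i]? = none := by
          rw [← List.head?_drop, hd]; rfl
        simp [this, pvSkillLoop]
      | cons c ss =>
        have hc : skill.toList[i]? = some c := by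
          rw [← List.head?_drop, hd]; rfl
        have hss : skill.toList.drop (i + 1) = ss := by
          rw [← List.tail_drop, hd]; rfl
        simp only [hget, hc, pvSkillLoop, pvNextLearnable, pvContains_ofList, ht, if_pos]
        by_cases hte : t = c
        · simp [hte, ih (i + 1), hss]
        · simp [hte]
    · have ht' : PySem.Chars.isIn [t] skill.toList = false := by simpa using ht
      cases hd : skill.toList.drop i with
      | nil => simp [ht', pvSkillLoop, ih i, hd]
      | cons c ss =>
        have hm : t ∉ skill.toList := fun hmem => by
          simp [(pvIsIn_singleton t skill.toList).2 hmem] at ht'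
        simp [ht', pvSkillLoop, pvNextLearnable, hm, ih i, hd]

-- ===== VERDICT (by name: the statement is the Claim_ definition above) =====
theorem is_able_skill_tree_spec : Claim_equal_is_able_skill_tree := by
  intro skill tree _ _
  unfold Spec_is_able_skill_tree is_able_skill_tree is_able_skill_tree_alt
  rw [pvOrder_eq_filter]
  simpa using pvCheck_filter_eq_skillLoop skill tree.toList 0
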